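-- pv_equiv track=rewrite | github.com/collinsakuma/LeetCode | Problems/2395. Find Subarrays With Equal Sum/find_subarrays.py | findSubarrays
-- ===== SOURCE A (Python) =====
-- def findSubarrays(nums):
--     seen = set() # keep track of unique sums
--     for i in range(len(nums) - 1): # loop through range of length nums minus 1
--         s = nums[i] + nums[i + 1] # find the sum of a pair
--         if s in seen: # if the sum is in s then an equal sum has been found return True
--             return True
--         seen.add(s)
--
--     return False # if no two sums are found return False
-- ===== SOURCE B (Python) =====
-- def findSubarrays(nums):
--     sums = sorted(nums[i] + nums[i + 1] for i in range(len(nums) - 1))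
--     return any(x == y for x, y in zip(sums, sums[1:]))
-- ===== Notes on version B (the rewrite author's own statement) =====
-- stated objective: alternative
-- what changed: Replaces A's hash-set membership loop with early return by a sort-then-scan algorithm: sort all adjacent-pair sums, then look for two equal neighbours in the sorted list (a duplicate exists iff some sorted neighbours are equal); no set is used at all.
import Mathlib
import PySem

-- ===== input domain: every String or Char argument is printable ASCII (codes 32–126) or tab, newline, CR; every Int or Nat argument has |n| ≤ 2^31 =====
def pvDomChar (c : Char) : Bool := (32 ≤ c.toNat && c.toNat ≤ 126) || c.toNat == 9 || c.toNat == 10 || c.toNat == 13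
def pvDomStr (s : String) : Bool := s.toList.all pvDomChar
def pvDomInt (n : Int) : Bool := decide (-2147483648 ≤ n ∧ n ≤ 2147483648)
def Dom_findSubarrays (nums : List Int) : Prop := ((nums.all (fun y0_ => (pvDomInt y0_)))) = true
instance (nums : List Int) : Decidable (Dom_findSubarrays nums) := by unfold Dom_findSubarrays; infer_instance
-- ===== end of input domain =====

-- B replaces A's incremental seen-set loop with sort-then-adjacent-scan over the
-- pair sums (a different algorithm, no set; same answer since a duplicate exists
-- iff some neighbours in the sorted list are equal).


-- ===== PORT A =====
-- the 'for i in range(len(nums) - 1)' loop with early return; indices are in range, so pyGetD's default 0 is never used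
def findSubarraysLoop (nums : List Int) (idxs : List Int) (seen : PySem.Set Int) : Bool :=
  match idxs with
  | [] => false
  | i :: rest =>
      let s := PySem.List.pyGetD nums i 0 + PySem.List.pyGetD nums (i + 1) 0
      if PySem.Set.contains seen s then true
      else findSubarraysLoop nums rest (PySem.Set.add seen s)

def findSubarrays (nums : List Int) : Bool :=
  findSubarraysLoop nums (PySem.List.pyRange 0 (PySem.List.len nums - 1) 1) PySem.Set.empty

-- ===== PORT B =====
-- sorted(pair sums), then any(x == y for x, y in zip(sums, sums[1:]))
def findSubarrays_alt (nums : List Int) : Bool :=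
  let sums := PySem.List.sorted
    ((PySem.List.pyRange 0 (PySem.List.len nums - 1) 1).map
      (fun i => PySem.List.pyGetD nums i 0 + PySem.List.pyGetD nums (i + 1) 0))
    (fun x => x) false
  (sums.zip (PySem.List.slice sums (some 1) none)).any (fun p => p.1 == p.2)

-- ===== PRECONDITION & SPEC =====
def Spec_findSubarrays (nums : List Int) (out : Bool) : Prop := out = findSubarrays_alt nums
instance (nums : List Int) (out : Bool) : Decidable (Spec_findSubarrays nums out) := by unfold Spec_findSubarrays; infer_instance

-- ===== CLAIM (what is proved, stated in full; the proofs are below) =====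
def Claim_equal_findSubarrays : Prop := ∀ (nums : List Int), Dom_findSubarrays nums → Spec_findSubarrays nums (findSubarrays nums)

-- ===== LEMMAS AND PROOFS =====

-- proof helper: A's duplicate scan over an already-materialized list of sums
def findSubarraysDup (xs : List Int) (seen : PySem.Set Int) : Bool :=
  match xs with
  | [] => false
  | x :: t => if PySem.Set.contains seen x then true else findSubarraysDup t (PySem.Set.add seen x)

-- A's loop only looks at the pair sums of the indices it visits
theorem loop_eq_map (nums : List Int) (idxs : List Int) (seen : PySem.Set Int) :
    findSubarraysLoop nums idxs seen =
      findSubarraysDup (idxs.map (fun i => PySem.List.pyGetD nums i 0 + PySem.List.pyGetD nums (i + 1) 0)) seen := by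
  induction idxs generalizing seen with
  | nil => rfl
  | cons i rest ih => simp [findSubarraysLoop, findSubarraysDup, ih]

-- the seen-set duplicate scan returns false iff the list is duplicate-free and disjoint from seen
theorem dup_false_iff (xs : List Int) (seen : PySem.Set Int) :
    findSubarraysDup xs seen = false ↔ xs.Nodup ∧ ∀ x ∈ xs, x ∉ seen := by
  induction xs generalizing seen with
  | nil => simp [findSubarraysDup]
  | cons x t ih =>
      simp only [findSubarraysDup]
      by_cases hx : x ∈ seen
      · rw [if_pos (by simpa [PySem.Set.contains_iff] using hx)]
        simp only [List.mem_cons]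
        constructor
        · intro h; cases h
        · rintro ⟨-, hdisj⟩; exact absurd hx (hdisj x (Or.inl rfl))
      · rw [if_neg (by simpa [PySem.Set.contains_iff] using hx)]
        rw [ih]
        constructor
        · rintro ⟨ht, hdisj⟩
          refine ⟨List.nodup_cons.mpr ⟨fun hxt => ?_, ht⟩, ?_⟩
          · exact (hdisj x hxt) ((PySem.Set.mem_add seen x x).mpr (Or.inr rfl))
          · intro y hy
            rcases List.mem_cons.mp hy with rfl | hyt
            · exact hx
            · intro hys
              exact (hdisj y hyt) ((PySem.Set.mem_add seen x y).mpr (Or.inl hys))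
        · rintro ⟨hnd, hdisj⟩
          rcases List.nodup_cons.mp hnd with ⟨hxt, ht⟩
          refine ⟨ht, fun y hy hys => ?_⟩
          rcases (PySem.Set.mem_add seen x y).mp hys with hys | rfl
          · exact (hdisj y (List.mem_cons_of_mem x hy)) hys
          · exact hxt hy

-- B's adjacent scan over a ≤-sorted list returns false iff the list has no duplicates
theorem adj_false_iff (l : List Int) (hp : l.Pairwise (· ≤ ·)) :
    ((l.zip (l.drop 1)).any (fun p => p.1 == p.2)) = false ↔ l.Nodup := by
  induction l with
  | nil => simp
  | cons x t ih =>
      rcases List.pairwise_cons.mp hp with ⟨hx, hpt⟩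
      cases t with
      | nil => simp
      | cons y t' =>
          have ihy := ih hpt
          simp only [List.drop_succ_cons, List.drop_zero, List.zip_cons_cons, List.any_cons,
            Bool.or_eq_false_iff, beq_eq_false_iff_ne, ne_eq] at ihy ⊢
          rw [ihy]
          constructor
          · rintro ⟨hxy, hnd⟩
            refine List.nodup_cons.mpr ⟨?_, hnd⟩
            intro hxm
            rcases List.mem_cons.mp hxm with rfl | hxt'
            · exact hxy rfl
            · have hxy' : x < y := lt_of_le_of_ne (hx y List.mem_cons_self) hxy
              have hyx : y ≤ x := (List.pairwise_cons.mp hpt).1 x hxt'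
              omega
          · intro hnd
            rcases List.nodup_cons.mp hnd with ⟨hxm, hnd'⟩
            exact ⟨fun h => hxm (h ▸ List.mem_cons_self), hnd'⟩

-- ===== VERDICT (by name: the statement is the Claim_ definition above) =====
theorem findSubarrays_spec : Claim_equal_findSubarrays := by
  intro nums _
  unfold Spec_findSubarrays findSubarrays findSubarrays_alt
  rw [loop_eq_map]
  set sums0 := (PySem.List.pyRange 0 (PySem.List.len nums - 1) 1).map
      (fun i => PySem.List.pyGetD nums i 0 + PySem.List.pyGetD nums (i + 1) 0) with hs0
  set sums := PySem.List.sorted sums0 (fun x => x) false with hs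
  show findSubarraysDup sums0 PySem.Set.empty =
    (sums.zip (PySem.List.slice sums (some 1) none)).any (fun p => p.1 == p.2)
  rw [PySem.List.slice_from sums (a := 1) (by norm_num)]
  simp only [Int.toNat_one]
  have hA : findSubarraysDup sums0 PySem.Set.empty = false ↔ sums0.Nodup := by
    rw [dup_false_iff]
    simp [PySem.Set.empty]
  have hpw : sums.Pairwise (· ≤ ·) := PySem.List.sorted_pairwise sums0 (fun x => x)
  have hB := adj_false_iff sums hpw
  have hperm : sums.Perm sums0 := PySem.List.sorted_perm sums0 (fun x => x) false
  have hnodup : sums.Nodup ↔ sums0.Nodup := hperm.nodup_iff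
  by_cases hnd : sums0.Nodup
  · rw [hA.mpr hnd, hB.mpr (hnodup.mpr hnd)]
  · have h1 : findSubarraysDup sums0 PySem.Set.empty = true :=
      Bool.ne_false_iff.mp (fun h => hnd (hA.mp h))
    have h2 : ((sums.zip (sums.drop 1)).any (fun p => p.1 == p.2)) = true :=
      Bool.ne_false_iff.mp (fun h => hnd (hnodup.mp (hB.mp h)))
    rw [h1, h2]
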